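-- pv_equiv track=rewrite | github.com/nickhealthy/python-algorithm | 프로그래머스/unrated/181837. 커피 심부름/커피 심부름.py | solution
-- ===== SOURCE A (Python) =====
-- def solution(order):
--     dic = {'americano': 4500, 'cafelatte': 5000, 'anything': 4500}
--
--     answer = 0
--     for i in order:
--         if 'anything' == i:
--             answer += 4500
--         elif 'americano' in i:
--             answer += 4500
--         else:
--             answer += 5000
--
--     return answer
-- ===== SOURCE B (Python) =====
-- def solution(order):
--     # divide-and-conquer: price a single order directly, split longer lists in half
--     n = len(order)
--     if n == 0:
--         return 0
--     if n == 1: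
--         return 4500 if order[0] == 'anything' or 'americano' in order[0] else 5000
--     mid = n // 2
--     return solution(order[:mid]) + solution(order[mid:])
-- ===== Notes on version B (the rewrite author's own statement) =====
-- stated objective: alternative
-- what changed: Replaces A's single left-to-right accumulator loop with a divide-and-conquer recursion: a one-element list is priced directly (4500 for 'anything' or an americano-containing order, else 5000) and a longer list is split in half and the two halves' totals are added.
import Mathlib
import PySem

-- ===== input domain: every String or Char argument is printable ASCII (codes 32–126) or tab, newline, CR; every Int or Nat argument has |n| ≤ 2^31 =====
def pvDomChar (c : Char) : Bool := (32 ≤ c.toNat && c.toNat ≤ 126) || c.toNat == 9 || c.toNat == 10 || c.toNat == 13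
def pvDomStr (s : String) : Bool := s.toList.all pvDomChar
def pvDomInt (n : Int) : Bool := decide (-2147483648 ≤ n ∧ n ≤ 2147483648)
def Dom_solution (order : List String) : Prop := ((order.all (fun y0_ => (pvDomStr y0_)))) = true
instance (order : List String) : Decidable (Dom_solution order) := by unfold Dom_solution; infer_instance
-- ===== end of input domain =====

-- B replaces A's left-to-right accumulator loop by a divide-and-conquer recursion (price singletons, split longer lists in half and add); objective: alternative decomposition, same cost.


-- ===== PORT A =====
def solution (order : List String) : Int :=
  -- dic is defined but unused in A
  order.foldl (fun answer i =>
    if i = "anything" then answer + 4500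
    else if PySem.Str.isIn "americano" i then answer + 4500
    else answer + 5000) 0

-- ===== PORT B =====
def solution_alt (order : List String) : Int :=
  match order with
  | [] => 0
  | [o] => if o = "anything" || PySem.Str.isIn "americano" o then (4500 : Int) else 5000
  | a :: b :: t =>
    let mid := (a :: b :: t).length / 2
    solution_alt (PySem.List.slice (a :: b :: t) none (some (mid : Int)))
      + solution_alt (PySem.List.slice (a :: b :: t) (some (mid : Int)) none)
termination_by order.length
decreasing_by
  · show (PySem.List.slice (a :: b :: t) none (some (((a :: b :: t).length / 2 : Nat) : Int))).length < (a :: b :: t).length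
    rw [PySem.List.slice_to_natCast]; simp; omega
  · show (PySem.List.slice (a :: b :: t) (some (((a :: b :: t).length / 2 : Nat) : Int)) none).length < (a :: b :: t).length
    rw [PySem.List.slice_from_natCast]; simp; omega

-- ===== PRECONDITION & SPEC =====
def Spec_solution (order : List String) (out : Int) : Prop := out = solution_alt order
instance (order : List String) (out : Int) : Decidable (Spec_solution order out) := by unfold Spec_solution; infer_instance

-- ===== CLAIM (what is proved, stated in full; the proofs are below) =====
def Claim_equal_solution : Prop := ∀ (order : List String), Dom_solution order → Spec_solution order (solution order)

-- ===== LEMMAS AND PROOFS =====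

-- per-order price, used only by the proofs to relate the two ports
def pvPrice (o : String) : Int :=
  if o = "anything" || PySem.Str.isIn "americano" o then 4500 else 5000

theorem solution_alt_eq_sum (order : List String) :
    solution_alt order = (order.map pvPrice).sum := by
  induction order using solution_alt.induct with
  | case1 => simp [solution_alt]
  | case2 o h => simp [solution_alt, pvPrice]
  | case3 o h => simp [solution_alt, pvPrice]
  | case4 a b t mid ih2 ih1 =>
    rw [solution_alt]
    rw [ih1, ih2]
    rw [PySem.List.slice_to_natCast, PySem.List.slice_from_natCast]
    rw [← List.sum_append, ← List.map_append, List.take_append_drop]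

theorem solution_foldl (order : List String) (a : Int) :
    order.foldl (fun answer i =>
      if i = "anything" then answer + 4500
      else if PySem.Str.isIn "americano" i then answer + 4500
      else answer + 5000) a = a + (order.map pvPrice).sum := by
  induction order generalizing a with
  | nil => simp
  | cons h t ih =>
    simp only [List.foldl_cons, List.map_cons, List.sum_cons, ih, pvPrice]
    split_ifs with h1 h2 <;> simp_all <;> ring

-- ===== VERDICT (by name: the statement is the Claim_ definition above) =====
theorem solution_spec : Claim_equal_solution := by
  intro order _
  unfold Spec_solution solution
  rw [solution_foldl, solution_alt_eq_sum]
  ring
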